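-- pv_equiv track=rewrite | github.com/jhsseonn/Programmers | 코테 입문 캘린더 - Programmers/Day 21/HideNumAdd.py | solution
-- ===== SOURCE A (Python) =====
-- def solution(my_string):
--     answer = 0
--
--     num = ''
--     for i in range(0, len(my_string)):
--         if my_string[i].isdigit():
--             num+=my_string[i]
--             if i==(len(my_string)-1):
--                 answer+=int(num)
--         else:
--             if num!='':
--                 answer+=int(num)
--             num = ''
--
--     return answer
-- ===== SOURCE B (Python) =====
-- def solution(my_string):
--     masked = ''.join(c if c.isdigit() else ' ' for c in my_string)
--     return sum(int(tok) for tok in masked.split())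
-- ===== Notes on version B (the rewrite author's own statement) =====
-- stated objective: simpler
-- what changed: Replaces A's per-character accumulator loop with its flush branch and end-of-string special case by masking non-digit characters to spaces, splitting the masked string with str.split(), and summing the int tokens.
import Mathlib
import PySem

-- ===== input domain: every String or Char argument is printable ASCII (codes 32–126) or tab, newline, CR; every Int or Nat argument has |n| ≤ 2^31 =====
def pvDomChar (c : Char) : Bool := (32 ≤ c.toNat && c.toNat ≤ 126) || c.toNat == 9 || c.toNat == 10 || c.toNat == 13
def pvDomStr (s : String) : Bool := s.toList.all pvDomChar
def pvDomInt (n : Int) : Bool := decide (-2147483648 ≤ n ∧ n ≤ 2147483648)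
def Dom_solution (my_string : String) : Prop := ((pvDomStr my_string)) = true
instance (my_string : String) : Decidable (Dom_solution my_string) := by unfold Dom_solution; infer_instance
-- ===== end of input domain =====

-- B replaces A's hand-rolled per-character accumulator/flush loop by mask-non-digits-to-spaces,
-- str.split(), sum — objective: simpler.

-- int(cs): cs is always a nonempty run of ASCII digits in both programs, so ofChars? is
-- always `some`; `.getD 0` only makes the helper total.
def pvIntOf (cs : List Char) : Int := (PySem.Int.ofChars? cs).getD 0

-- ===== PORT A =====
-- the for-loop of A: state (answer, num); `rest = []` is A's `i == len(my_string)-1` test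
def solGo : List Char → Int → List Char → Int
  | [], answer, _ => answer
  | c :: rest, answer, num =>
    if PySem.Chars.isdigit c then
      let num' := num ++ [c]
      if rest = [] then solGo rest (answer + pvIntOf num') num'
      else solGo rest answer num'
    else
      if num ≠ [] then solGo rest (answer + pvIntOf num) []
      else solGo rest answer []

def solution (my_string : String) : Int := solGo my_string.toList 0 []

-- ===== PORT B =====
def pvMask (c : Char) : Char := if PySem.Chars.isdigit c then c else ' '

def solution_alt (my_string : String) : Int :=
  let masked := my_string.toList.map pvMask            -- ''.join(c if c.isdigit() else ' ' ...)
  ((PySem.Chars.split₀ masked).map pvIntOf).sum        -- sum(int(tok) for tok in masked.split())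

-- ===== PRECONDITION & SPEC =====
def Spec_solution (my_string : String) (out : Int) : Prop := out = solution_alt my_string
instance (my_string : String) (out : Int) : Decidable (Spec_solution my_string out) := by unfold Spec_solution; infer_instance

-- ===== CLAIM (what is proved, stated in full; the proofs are below) =====
def Claim_equal_solution : Prop := ∀ (my_string : String), Dom_solution my_string → Spec_solution my_string (solution my_string)

-- ===== LEMMAS AND PROOFS =====

-- structural version of str.split() on whitespace
def splitNS : List Char → List (List Char)
  | [] => []
  | c :: rest =>
    if PySem.Chars.isspace c then splitNS rest
    else (c :: rest.takeWhile (fun d => !PySem.Chars.isspace d)) ::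
         splitNS (rest.dropWhile (fun d => !PySem.Chars.isspace d))
termination_by cs => cs.length
decreasing_by
  · simp
  · have := List.length_dropWhile_le (fun d => !PySem.Chars.isspace d) rest
    simp; omega

def pvMerge (cur s : List Char) : List (List Char) :=
  if cur = [] then splitNS s
  else (cur.reverse ++ s.takeWhile (fun d => !PySem.Chars.isspace d)) ::
       splitNS (s.dropWhile (fun d => !PySem.Chars.isspace d))

theorem split₀_go_spec (s : List Char) : ∀ cur acc,
    PySem.Chars.split₀.go s cur acc = acc.reverse ++ pvMerge cur s := by
  induction s with
  | nil =>
    intro cur acc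
    by_cases h : cur = [] <;>
      simp [PySem.Chars.split₀.go, pvMerge, splitNS, h, List.isEmpty_iff]
  | cons c rest ih =>
    intro cur acc
    by_cases hs : PySem.Chars.isspace c
    · by_cases h : cur = []
      · simp [PySem.Chars.split₀.go, hs, h, ih, pvMerge, splitNS]
      · simp [PySem.Chars.split₀.go, hs, h, List.isEmpty_iff, ih, pvMerge, splitNS]
    · have : PySem.Chars.split₀.go (c :: rest) cur acc = PySem.Chars.split₀.go rest (c :: cur) acc := by
        simp [PySem.Chars.split₀.go, hs]
      rw [this, ih]
      by_cases h : cur = [] <;>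
        simp [pvMerge, h, splitNS, hs]

theorem split₀_eq_splitNS (s : List Char) : PySem.Chars.split₀ s = splitNS s := by
  have := split₀_go_spec s [] []
  simpa [PySem.Chars.split₀, pvMerge] using this

theorem digit_not_space {c : Char} (h : PySem.Chars.isdigit c = true) :
    PySem.Chars.isspace c = false := by
  simp [PySem.Chars.isdigit, Char.le_def, UInt32.le_iff_toNat_le] at h
  have h' : 48 ≤ c.toNat ∧ c.toNat ≤ 57 := by unfold Char.toNat; exact h
  simp only [PySem.Chars.isspace, Bool.or_eq_false_iff, Bool.and_eq_false_iff,
    decide_eq_false_iff_not]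
  omega

theorem space_isspace : PySem.Chars.isspace ' ' = true := by decide

theorem map_mask_digits {num : List Char} (h : ∀ c ∈ num, PySem.Chars.isdigit c = true) :
    num.map pvMask = num := by
  induction num with
  | nil => simp
  | cons c t ih =>
    have hc := h c (by simp)
    simp [pvMask, hc, ih (fun d hd => h d (by simp [hd]))]

theorem splitNS_digits_append {num : List Char}
    (h : ∀ c ∈ num, PySem.Chars.isdigit c = true) (ys : List Char) :
    splitNS (num ++ ' ' :: ys) = (if num = [] then [] else [num]) ++ splitNS ys := by
  cases num with
  | nil => simp [splitNS, space_isspace]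
  | cons d t =>
    have hd := digit_not_space (h d (by simp))
    have ht : ∀ c ∈ t, (fun x => !PySem.Chars.isspace x) c = true := by
      intro c hc; simp [digit_not_space (h c (by simp [hc]))]
    rw [List.cons_append, splitNS]
    simp only [hd, Bool.false_eq_true, if_false]
    rw [List.takeWhile_append_of_pos ht, List.dropWhile_append_of_pos ht]
    simp [splitNS, space_isspace]

theorem splitNS_digits {num : List Char}
    (h : ∀ c ∈ num, PySem.Chars.isdigit c = true) (hne : num ≠ []) :
    splitNS num = [num] := by
  cases num with
  | nil => exact absurd rfl hne
  | cons d t =>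
    have hd := digit_not_space (h d (by simp))
    have ht : ∀ c ∈ t, (fun x => !PySem.Chars.isspace x) c = true := by
      intro c hc; simp [digit_not_space (h c (by simp [hc]))]
    rw [splitNS]
    simp only [hd, Bool.false_eq_true, if_false]
    rw [List.takeWhile_eq_self_iff.mpr ht, List.dropWhile_eq_nil_iff.mpr ht]
    simp [splitNS]

def pvSumTok (xs : List Char) : Int := ((splitNS (xs.map pvMask)).map pvIntOf).sum

theorem solGo_spec (cs : List Char) : ∀ (ans : Int) (num : List Char),
    (∀ c ∈ num, PySem.Chars.isdigit c = true) →
    solGo cs ans num =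
      ans + pvSumTok (num ++ cs) - (if cs = [] ∧ num ≠ [] then pvIntOf num else 0) := by
  induction cs with
  | nil =>
    intro ans num h
    by_cases hn : num = []
    · simp [solGo, pvSumTok, hn, splitNS]
    · simp [solGo, pvSumTok, hn, map_mask_digits h,
        splitNS_digits h hn]
  | cons c rest ih =>
    intro ans num h
    by_cases hd : PySem.Chars.isdigit c
    · have h' : ∀ x ∈ num ++ [c], PySem.Chars.isdigit x = true := by
        intro x hx
        rcases List.mem_append.mp hx with hx | hx
        · exact h x hx
        · simp at hx; subst hx; exact hd
      by_cases hr : rest = []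
      · subst hr
        have hne : num ++ [c] ≠ [] := by simp
        simp [solGo, hd, pvSumTok, map_mask_digits h', splitNS_digits h' hne]
      · simp only [solGo, hd, if_true, if_neg hr]
        rw [ih _ _ h']
        simp [hr, List.append_assoc]
    · have hmask : (num ++ c :: rest).map pvMask = num ++ ' ' :: rest.map pvMask := by
        simp [map_mask_digits h, pvMask, hd]
      have hsplit : splitNS ((num ++ c :: rest).map pvMask) =
          (if num = [] then [] else [num]) ++ splitNS (rest.map pvMask) := by
        rw [hmask, splitNS_digits_append h]
      by_cases hn : num = []
      · subst hn
        simp only [solGo, hd, Bool.false_eq_true, if_false, ne_eq, not_true_eq_false]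
        rw [ih _ _ (by simp)]
        simp only [pvSumTok]
        rw [hsplit]
        simp
      · simp only [solGo, hd, Bool.false_eq_true, if_false, ne_eq, hn, not_false_eq_true, if_true]
        rw [ih _ _ (by simp)]
        simp only [pvSumTok]
        rw [hsplit]
        simp [hn]
        ring

-- ===== VERDICT (by name: the statement is the Claim_ definition above) =====
theorem solution_spec : Claim_equal_solution := by
  intro s _
  unfold Spec_solution solution solution_alt
  rw [solGo_spec s.toList 0 [] (by simp)]
  simp [pvSumTok, split₀_eq_splitNS]
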